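-- pv_equiv track=rewrite | github.com/christyheaton/advent2022 | 2015/day01.py | floor_count
-- ===== SOURCE A (Python) =====
-- def floor_count(input_data: str, part: int = 0) -> int:
--     """calculate final floor to deliver presents"""
--     floor = 0
--     for i in enumerate(input_data, 1):
--         if i[1] == '(':
--             floor += 1
--         elif i[1] == ')':
--             floor -= 1
--         else:
--             raise ValueError('Instruction must be either "(" or ")".')
--         if part == 2:
--             if floor < 0:
--                 return i[0]
--     return floor
-- ===== SOURCE B (Python) =====
-- def floor_count(input_data: str, part: int = 0) -> int:
--     """calculate final floor to deliver presents"""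
--     if part != 2:
--         opens = input_data.count('(')
--         closes = input_data.count(')')
--         if opens + closes != len(input_data):
--             raise ValueError('Instruction must be either "(" or ")".')
--         return opens - closes
--     floor = 0
--     i = 0
--     while i < len(input_data):
--         ch = input_data[i]
--         if ch not in '()':
--             raise ValueError('Instruction must be either "(" or ")".')
--         floor += 1 if ch == '(' else -1
--         i += 1
--         if floor < 0:
--             return i
--     return floor
-- ===== Notes on version B (the rewrite author's own statement) =====
-- stated objective: simpler
-- what changed: For part other than 2, B returns a closed-form difference of the two paren-character counts (validating via their sum against the length) instead of running A's accumulation loop; only the part 2 basement search keeps a scan, rewritten as an index-based while loop that validates lazily.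
import Mathlib
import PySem

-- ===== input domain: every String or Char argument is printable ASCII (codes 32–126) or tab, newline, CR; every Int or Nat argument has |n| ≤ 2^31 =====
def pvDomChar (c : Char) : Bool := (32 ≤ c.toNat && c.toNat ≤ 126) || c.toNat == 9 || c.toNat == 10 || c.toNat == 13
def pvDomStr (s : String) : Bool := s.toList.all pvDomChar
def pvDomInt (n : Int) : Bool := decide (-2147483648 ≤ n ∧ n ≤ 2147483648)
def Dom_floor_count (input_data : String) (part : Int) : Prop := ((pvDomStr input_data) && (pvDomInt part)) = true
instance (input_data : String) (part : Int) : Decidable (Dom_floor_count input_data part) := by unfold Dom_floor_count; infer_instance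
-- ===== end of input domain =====

-- B replaces A's single running-sum loop by a closed-form count for part != 2 and a lazy
-- index-based basement scan for part == 2 (objective: simpler).

-- ===== PORT A =====
-- A's for-loop over enumerate(input_data, 1); 0 on the ValueError branch (excluded by Pre_).
def pvLoopA (part : Int) : List Char → Nat → Int → Int
  | [], _, floor => floor
  | c :: rest, pos, floor =>
    if c = '(' then
      let f := floor + 1
      if part = 2 ∧ f < 0 then (pos : Int) else pvLoopA part rest (pos + 1) f
    else if c = ')' then
      let f := floor - 1
      if part = 2 ∧ f < 0 then (pos : Int) else pvLoopA part rest (pos + 1) f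
    else 0  -- raise ValueError

def floor_count (input_data : String) (part : Int) : Int :=
  pvLoopA part input_data.toList 1 0

-- ===== PORT B =====
-- B's while loop over index i for part == 2; 0 on the ValueError branch (excluded by Pre_).
def pvScanB (s : List Char) (i : Nat) (floor : Int) : Int :=
  if h : i < s.length then
    let ch := s[i]
    if ch = '(' ∨ ch = ')' then
      let f := floor + (if ch = '(' then 1 else -1)
      if f < 0 then ((i + 1 : Nat) : Int) else pvScanB s (i + 1) f
    else 0  -- raise ValueError
  else floor
termination_by s.length - i

def floor_count_alt (input_data : String) (part : Int) : Int :=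
  if part ≠ 2 then
    let opens := PySem.Str.count input_data "("
    let closes := PySem.Str.count input_data ")"
    if (opens : Int) + (closes : Int) ≠ (input_data.toList.length : Int) then 0  -- raise ValueError
    else (opens : Int) - (closes : Int)
  else pvScanB input_data.toList 0 0

-- ===== PRECONDITION & SPEC =====
-- Pre_ excludes exactly the inputs on which A raises ValueError: a non-instruction
-- character is reached by the scan (for part == 2 the scan stops at the first basement
-- position, so invalid characters after it are never reached and stay inside Pre_).
def Pre_floor_count (input_data : String) (part : Int) : Prop :=
  (input_data.toList.all (fun c => c = '(' || c = ')')) = true ∨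
  (part = 2 ∧ ((List.range (input_data.toList.length + 1)).any (fun i =>
    (input_data.toList.take i).all (fun c => c = '(' || c = ')') &&
    decide (((input_data.toList.take i).count '(' : Int) < ((input_data.toList.take i).count ')' : Int)))) = true)
instance (input_data : String) (part : Int) : Decidable (Pre_floor_count input_data part) := by
  unfold Pre_floor_count; infer_instance

def pvWitness_floor_count : String × Int := ("(())", 0)

def Spec_floor_count (input_data : String) (part : Int) (out : Int) : Prop := out = floor_count_alt input_data part
instance (input_data : String) (part : Int) (out : Int) : Decidable (Spec_floor_count input_data part out) := by unfold Spec_floor_count; infer_instance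

-- ===== CLAIM (what is proved, stated in full; the proofs are below) =====
def Claim_equal_floor_count : Prop := ∀ (input_data : String) (part : Int), Dom_floor_count input_data part → Pre_floor_count input_data part → Spec_floor_count input_data part (floor_count input_data part)

-- ===== LEMMAS AND PROOFS =====

-- B's part == 2 scan agrees with A's loop run with part = 2 (index-shifted tail view).
theorem pvScanB_eq_pvLoopA (s : List Char) (i : Nat) (f : Int) :
    pvScanB s i f = pvLoopA 2 (s.drop i) (i + 1) f := by
  rw [pvScanB]
  by_cases h : i < s.length
  · rw [dif_pos h, List.drop_eq_getElem_cons h]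
    by_cases h1 : s[i] = '('
    · have hrec := pvScanB_eq_pvLoopA s (i + 1) (f + 1)
      simp [pvLoopA, h1, hrec]
    · by_cases h1' : s[i] = ')'
      · have hrec : pvScanB s (i + 1) (f + -1) = pvLoopA 2 (s.drop (i + 1)) (i + 1 + 1) (f + -1) :=
          pvScanB_eq_pvLoopA s (i + 1) (f + -1)
        simp [pvLoopA, h1, h1', hrec, sub_eq_add_neg]
      · simp [pvLoopA, h1, h1']
  · rw [dif_neg h, List.drop_eq_nil_of_le (by omega), pvLoopA]
termination_by s.length - i
decreasing_by all_goals omega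

-- A's loop with part ≠ 2 on all-valid input is a closed-form count difference.
theorem pvLoopA_valid (part : Int) (hp : part ≠ 2) :
    ∀ (s : List Char) (pos : Nat) (f : Int), (∀ c ∈ s, c = '(' ∨ c = ')') →
      pvLoopA part s pos f = f + (s.count '(' : Int) - (s.count ')' : Int) := by
  intro s
  induction s with
  | nil => intro pos f _; simp [pvLoopA]
  | cons c rest ih =>
    intro pos f hv
    have hc : c = '(' ∨ c = ')' := hv c (by simp)
    have hv' : ∀ x ∈ rest, x = '(' ∨ x = ')' := fun x hx => hv x (by simp [hx])
    rcases hc with hc | hc <;> subst hc <;>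
      simp [pvLoopA, hp, ih _ _ hv', List.count_cons] <;> push_cast <;> ring

-- All-valid input: the two character counts sum to the length.
theorem valid_count_sum (s : List Char) (hv : ∀ c ∈ s, c = '(' ∨ c = ')') :
    s.count '(' + s.count ')' = s.length := by
  induction s with
  | nil => simp
  | cons c rest ih =>
    have hc := hv c (by simp)
    have h' := ih (fun x hx => hv x (by simp [hx]))
    rcases hc with hc | hc <;> subst hc <;>
      simp [List.count_cons] <;> omega

-- PySem.Chars.count with a single-character needle is List.count (the .go worker).
theorem chars_count_go_singleton (c : Char) :
    ∀ (s : List Char) (fuel acc : Nat), s.length ≤ fuel →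
      PySem.Chars.count.go [c] fuel s acc = acc + s.count c := by
  intro s
  induction s with
  | nil =>
    intro fuel acc _
    cases fuel <;> simp [PySem.Chars.count.go]
  | cons h t ih =>
    intro fuel acc hle
    cases fuel with
    | zero => simp at hle
    | succ f =>
      have hle' : t.length ≤ f := by simpa using hle
      by_cases hc : c = h
      · have hpre : List.isPrefixOf [c] (h :: t) = true := by simp [List.isPrefixOf, hc]
        simp only [PySem.Chars.count.go, hpre, if_true, List.length_cons,
          List.length_singleton, List.length_nil, List.drop_succ_cons, List.drop_zero]
        rw [ih f (acc + 1) hle']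
        simp [List.count_cons, hc]
        omega
      · have hpre : List.isPrefixOf [c] (h :: t) = false := by
          simp [List.isPrefixOf]; first | exact hc | exact Ne.symm hc
        simp only [PySem.Chars.count.go, hpre, Bool.false_eq_true, if_false]
        rw [ih f acc hle']
        simp [List.count_cons, Ne.symm hc]

theorem chars_count_singleton (s : List Char) (c : Char) :
    PySem.Chars.count s [c] = s.count c := by
  rw [PySem.Chars.count, if_neg (by simp)]
  rw [chars_count_go_singleton c s s.length 0 le_rfl]
  omega

-- Str.count on a one-character literal needle is List.count on .toList.
theorem str_count_open (s : String) : PySem.Str.count s "(" = s.toList.count '(' := by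
  rw [PySem.Str.count_eq]
  have : ("(" : String).toList = ['('] := rfl
  rw [this, chars_count_singleton]

theorem str_count_close (s : String) : PySem.Str.count s ")" = s.toList.count ')' := by
  rw [PySem.Str.count_eq]
  have : (")" : String).toList = [')'] := rfl
  rw [this, chars_count_singleton]

-- ===== VERDICT (by name: the statement is the Claim_ definition above) =====
theorem floor_count_spec : Claim_equal_floor_count := by
  intro input_data part _hdom hpre
  unfold Spec_floor_count floor_count floor_count_alt
  by_cases hp : part = 2
  · subst hp
    simp only [ne_eq, not_true_eq_false, if_false]
    rw [pvScanB_eq_pvLoopA input_data.toList 0 0]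
    simp
  · have hv : ∀ c ∈ input_data.toList, c = '(' ∨ c = ')' := by
      rcases hpre with h | ⟨h2, _⟩
      · intro c hc
        simpa using List.all_eq_true.mp h c hc
      · exact absurd h2 hp
    rw [if_pos hp]
    simp only [str_count_open, str_count_close]
    have hsum := valid_count_sum _ hv
    rw [if_neg (by push_cast; omega)]
    rw [pvLoopA_valid part hp _ 1 0 hv]
    ring
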